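-- pv_equiv track=rewrite | github.com/redst4r/rnaseqtools | rnaseqtools/seqerrors/transcript_errors.py | _get_number_of_shadows
-- ===== SOURCE A (Python) =====
-- def _get_1BP_mutants(seq:str, position:int):
--     "return the three 1BP mutations of a sequence at the given position"
--     for base in ['A', 'C', 'G', 'T']:
--         new = seq[:position] + base + seq[position+1:]
--         if seq != new:
--             yield new
--
-- def _get_number_of_shadows(cb, counter_some_error):
--     """
--     for a given sequence, check the total reads that its 1BP neighbours have
--     we do this position dependent too: how many reads where CB and read differ by 1BP in the first base
--
--     return a dict with 16 positions, with the number of 1BP neighbours at each position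
--     """
--     shadow_counts_per_position = {}
--     for i in range(len(cb)):
--         shadow_counts_per_position[i] = 0
--         for mutant in _get_1BP_mutants(cb, position=i):
--             if mutant in counter_some_error:
--                 shadow_counts_per_position[i] += counter_some_error[mutant]
--     return shadow_counts_per_position
-- ===== SOURCE B (Python) =====
-- def _get_number_of_shadows(cb, counter_some_error):
--     """Scan the counter once: each key at Hamming distance 1 from cb (same
--     length, differing base in ACGT) adds its count at the differing position."""
--     L = len(cb)
--     counts = [0] * L
--     for s, c in counter_some_error.items():
--         if len(s) != L:
--             continue
--         diffs = [j for j in range(L) if s[j] != cb[j]]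
--         if len(diffs) == 1 and s[diffs[0]] in ('A', 'C', 'G', 'T'):
--             counts[diffs[0]] += c
--     return {i: v for i, v in enumerate(counts)}
-- ===== Notes on version B (the rewrite author's own statement) =====
-- stated objective: faster
-- what changed: Instead of generating the 3 one-base mutants of cb at every position (each an O(L) string build) and looking each up in the dict, B makes a single pass over the counter items, classifying each key by its Hamming profile against cb (same length, exactly one differing position, differing base in ACGT) and accumulating its count into a per-position array.
import Mathlib
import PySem

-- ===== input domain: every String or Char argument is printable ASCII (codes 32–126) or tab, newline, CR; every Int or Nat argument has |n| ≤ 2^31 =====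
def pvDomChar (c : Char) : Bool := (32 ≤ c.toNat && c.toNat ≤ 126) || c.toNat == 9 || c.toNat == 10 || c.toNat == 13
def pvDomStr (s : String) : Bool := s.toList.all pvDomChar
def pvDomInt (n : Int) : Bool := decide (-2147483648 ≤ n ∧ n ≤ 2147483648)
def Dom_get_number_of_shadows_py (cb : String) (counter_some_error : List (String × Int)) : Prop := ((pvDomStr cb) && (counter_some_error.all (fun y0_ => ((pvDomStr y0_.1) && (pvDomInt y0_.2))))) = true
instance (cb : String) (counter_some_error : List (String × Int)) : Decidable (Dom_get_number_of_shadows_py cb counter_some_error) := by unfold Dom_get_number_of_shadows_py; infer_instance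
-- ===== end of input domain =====

-- B replaces A's per-position mutant generation (O(L) string builds per position) by a
-- single pass over the counter items, classifying each key against cb (measured faster).
-- Return-value equivalence only; dict lookup = first match on the association list.

-- ===== PORT A =====
-- dict key lookup (first match) on the association list representing the Python dict
def pvLookup (l : List (String × Int)) (k : String) : Option Int :=
  (l.find? (fun p => p.1 == k)).map (·.2)

-- _get_1BP_mutants: generator consumed in order = list of the yielded strings
def pvMutants (seq : String) (position : Int) : List String :=
  (["A", "C", "G", "T"].map (fun base =>
      PySem.Str.slice seq none (some position) ++ base ++ PySem.Str.slice seq (some (position + 1)) none)).filter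
    (fun new => seq ≠ new)

def get_number_of_shadows_py (cb : String) (counter_some_error : List (String × Int)) : List (Int × Int) :=
  ((PySem.List.pyRange 0 (PySem.Str.len cb) 1).foldl
    (fun (d : PySem.Dict Int Int) i =>
      (pvMutants cb i).foldl
        (fun d mutant =>
          match pvLookup counter_some_error mutant with
          | some v => d.modify i 0 (· + v)
          | none => d)
        (d.insert i 0))
    PySem.Dict.empty).items

-- ===== PORT B =====
def get_number_of_shadows_py_alt (cb : String) (counter_some_error : List (String × Int)) : List (Int × Int) :=
  let cl := cb.toList
  let L := cl.length
  let counts := counter_some_error.foldl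
    (fun (counts : List Int) p =>
      let s := p.1.toList
      if s.length = L then
        match (List.range L).filter (fun j => s[j]? ≠ cl[j]?) with
        | [i] =>
          if s[i]? = some 'A' ∨ s[i]? = some 'C' ∨ s[i]? = some 'G' ∨ s[i]? = some 'T' then
            counts.set i (counts.getD i 0 + p.2)
          else counts
        | _ => counts
      else counts)
    (List.replicate L 0)
  (List.range L).map (fun (i : Nat) => ((i : Int), counts.getD i 0))

-- ===== PRECONDITION & SPEC =====
-- Pre_ excludes association lists with duplicate keys: a Python dict cannot contain
-- them, so every input A actually receives satisfies Pre_.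
def Pre_get_number_of_shadows_py (cb : String) (counter_some_error : List (String × Int)) : Prop :=
  (counter_some_error.map Prod.fst).Nodup
instance (cb : String) (counter_some_error : List (String × Int)) : Decidable (Pre_get_number_of_shadows_py cb counter_some_error) := by unfold Pre_get_number_of_shadows_py; infer_instance

def pvWitness_get_number_of_shadows_py : String × (List (String × Int)) := ("AC", [("CC", 3), ("AG", 2)])

def Spec_get_number_of_shadows_py (cb : String) (counter_some_error : List (String × Int)) (out : List (Int × Int)) : Prop := out = get_number_of_shadows_py_alt cb counter_some_error
instance (cb : String) (counter_some_error : List (String × Int)) (out : List (Int × Int)) : Decidable (Spec_get_number_of_shadows_py cb counter_some_error out) := by unfold Spec_get_number_of_shadows_py; infer_instance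

-- ===== CLAIM (what is proved, stated in full; the proofs are below) =====
def Claim_equal_get_number_of_shadows_py : Prop := ∀ (cb : String) (counter_some_error : List (String × Int)), Dom_get_number_of_shadows_py cb counter_some_error → Pre_get_number_of_shadows_py cb counter_some_error → Spec_get_number_of_shadows_py cb counter_some_error (get_number_of_shadows_py cb counter_some_error)

-- ===== LEMMAS AND PROOFS =====

-- value accumulated by A's inner loop at position i, as an Int fold
def aVal (cb : String) (c : List (String × Int)) (i : Int) : Int :=
  (pvMutants cb i).foldl
    (fun acc m => match pvLookup c m with | some v => acc + v | none => acc) 0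

-- contribution of one counter entry to position n, following B's branch structure
def contrib (cl : List Char) (n : Nat) (p : String × Int) : Int :=
  if p.1.toList.length = cl.length then
    match (List.range cl.length).filter (fun j => p.1.toList[j]? ≠ cl[j]?) with
    | [i] =>
      if p.1.toList[i]? = some 'A' ∨ p.1.toList[i]? = some 'C' ∨ p.1.toList[i]? = some 'G' ∨ p.1.toList[i]? = some 'T' then
        (if i = n then p.2 else 0)
      else 0
    | _ => 0
  else 0

-- A's inner dict loop only rewrites key i, which is present: it is an insert of the Int fold
theorem inner_dict_eq (c : List (String × Int)) (ms : List String)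
    (d : PySem.Dict Int Int) (i : Int) (a : Int) :
    ms.foldl
      (fun d mutant =>
        match pvLookup c mutant with
        | some v => d.modify i 0 (· + v)
        | none => d)
      (d.insert i a)
    = d.insert i (ms.foldl
        (fun acc m => match pvLookup c m with | some v => acc + v | none => acc) a) := by
  induction ms generalizing a with
  | nil => rfl
  | cons m t ih =>
    simp only [List.foldl_cons]
    cases h : pvLookup c m with
    | none => simp only [h]; exact ih a
    | some v =>
      simp only [h, PySem.Dict.modify, PySem.Dict.getD_insert_self,
        PySem.Dict.insert_insert_self]
      exact ih (a + v)

-- A's output is the list of (i, aVal i) over the positions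
theorem portA_eq_map (cb : String) (c : List (String × Int)) :
    get_number_of_shadows_py cb c
      = (List.range cb.toList.length).map (fun (n : Nat) => ((n : Int), aVal cb c (n : Int))) := by
  unfold get_number_of_shadows_py
  have hbody : (fun (d : PySem.Dict Int Int) (i : Int) =>
      (pvMutants cb i).foldl
        (fun d mutant =>
          match pvLookup c mutant with
          | some v => d.modify i 0 (· + v)
          | none => d)
        (d.insert i 0))
      = fun (d : PySem.Dict Int Int) (i : Int) => d.insert i (aVal cb c i) := by
    funext d i
    exact inner_dict_eq c (pvMutants cb i) d i 0
  rw [hbody, PySem.Str.len_eq, PySem.List.pyRange_zero_natCast]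
  have hinj : Function.Injective (fun (k : Nat) => (k : Int)) :=
    fun a b h => Int.natCast_inj.mp h
  have hfresh := PySem.Dict.items_foldl_insert_fresh
    ((List.range cb.toList.length).map (fun (k : Nat) => (k : Int)))
    (fun a => a) (fun a => aVal cb c a) (PySem.Dict.empty : PySem.Dict Int Int)
    (by intro a _; simp [PySem.Dict.contains_empty])
    (List.Nodup.map (fun a b h => h) (List.Nodup.map hinj List.nodup_range))
  have hfresh' : (List.foldl (fun (d : PySem.Dict Int Int) (i : Int) => d.insert i (aVal cb c i))
      PySem.Dict.empty ((List.range cb.toList.length).map (fun (k : Nat) => (k : Int)))).items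
      = PySem.Dict.empty.items
        ++ ((List.range cb.toList.length).map (fun (k : Nat) => (k : Int))).map
            (fun a => (a, aVal cb c a)) := hfresh
  rw [hfresh']
  simp [PySem.Dict.empty, List.map_map]

-- Int fold of lookups = starting value + sum of looked-up values
theorem foldl_lookup_eq_sum (c : List (String × Int)) (ms : List String) (a : Int) :
    ms.foldl (fun acc m => match pvLookup c m with | some v => acc + v | none => acc) a
      = a + (ms.map (fun m => (pvLookup c m).getD 0)).sum := by
  induction ms generalizing a with
  | nil => simp
  | cons m t ih =>
    simp only [List.foldl_cons, List.map_cons, List.sum_cons]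
    cases h : pvLookup c m with
    | none => simp only [h, Option.getD_none]; rw [ih]; ring
    | some v => simp only [h, Option.getD_some]; rw [ih]; ring

theorem sum_map_ite_of_nodup (ms : List String) (k : String) (a : Int) (g : String → Int)
    (hnd : ms.Nodup) (hk : g k = 0) :
    (ms.map (fun m => if k = m then a else g m)).sum
      = (if k ∈ ms then a else 0) + (ms.map g).sum := by
  induction ms with
  | nil => simp
  | cons m t ih =>
    rcases List.nodup_cons.mp hnd with ⟨hm, ht⟩
    by_cases hkm : k = m
    · subst hkm
      have : t.map (fun m => if k = m then a else g m) = t.map g := by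
        apply List.map_congr_left
        intro x hx
        have : k ≠ x := fun h => hm (h ▸ hx)
        simp [this]
      simp [this, hk]
    · simp only [List.map_cons, List.sum_cons, if_neg hkm, List.mem_cons]
      rw [ih ht]
      rw [if_congr (or_iff_right hkm) rfl rfl]
      ring

theorem pvLookup_cons (p : String × Int) (t : List (String × Int)) (m : String) :
    pvLookup (p :: t) m = if p.1 = m then some p.2 else pvLookup t m := by
  simp only [pvLookup, List.find?_cons]
  cases hb : (p.1 == m) with
  | true => simp [beq_iff_eq.mp hb]
  | false => simp [hb, beq_eq_false_iff_ne.mp hb]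

theorem pvLookup_eq_none (t : List (String × Int)) (k : String)
    (h : k ∉ t.map Prod.fst) : pvLookup t k = none := by
  simp only [pvLookup, Option.map_eq_none_iff, List.find?_eq_none]
  intro p hp
  simp only [beq_iff_eq]
  intro hk
  exact h (hk ▸ List.mem_map_of_mem hp)

-- sum over the mutants of their dict value = sum over the dict entries that are mutants
theorem sum_lookup_eq_sum_entries (c : List (String × Int)) (ms : List String)
    (hc : (c.map Prod.fst).Nodup) (hms : ms.Nodup) :
    (ms.map (fun m => (pvLookup c m).getD 0)).sum
      = (c.map (fun p => if p.1 ∈ ms then p.2 else 0)).sum := by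
  induction c with
  | nil =>
    have : ms.map (fun m => (pvLookup [] m).getD 0) = ms.map (fun _ => (0:Int)) := by
      apply List.map_congr_left; intro x _; rfl
    simp [this]
  | cons p t ih =>
    have hc' : (p.1 :: t.map Prod.fst).Nodup := by simpa using hc
    rcases List.nodup_cons.mp hc' with ⟨hp, ht⟩
    have hmap : ms.map (fun m => (pvLookup (p :: t) m).getD 0)
        = ms.map (fun m => if p.1 = m then p.2 else (pvLookup t m).getD 0) := by
      apply List.map_congr_left
      intro m _
      rw [pvLookup_cons]
      by_cases h : p.1 = m <;> simp [h]
    rw [hmap, sum_map_ite_of_nodup ms p.1 p.2 _ hms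
      (by rw [pvLookup_eq_none t p.1 hp]; rfl)]
    rw [ih ht]
    simp

-- toList of the built mutant string
theorem built_toList (cb : String) (n : Nat) (base : String) :
    (PySem.Str.slice cb none (some (n : Int)) ++ base
      ++ PySem.Str.slice cb (some ((n : Int) + 1)) none).toList
      = cb.toList.take n ++ base.toList ++ cb.toList.drop (n + 1) := by
  have h1 : ((n : Int) + 1) = ((n + 1 : Nat) : Int) := by push_cast; ring
  simp only [PySem.Str.slice, PySem.Chars.slice, String.toList_append, String.toList_ofList]
  rw [PySem.List.slice_to_natCast, h1, PySem.List.slice_from_natCast]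

theorem set_eq_self_iff (cl : List Char) (n : Nat) (b : Char) (h : n < cl.length) :
    cl.set n b = cl ↔ cl[n]? = some b := by
  constructor
  · intro he
    have := congrArg (fun l => l[n]?) he
    simpa [List.getElem?_set, h] using this.symm
  · intro he
    have hb : cl[n] = b := by
      have := List.getElem?_eq_getElem h
      rw [he] at this
      exact (Option.some_injective _ this).symm
    rw [← hb]
    exact List.set_getElem_self h
  
-- equality with a built mutant string, at the toList level
theorem build_eq_iff (cb s base : String) (b : Char) (n : Nat) (hn : n < cb.toList.length)
    (hb : base.toList = [b]) :
    (PySem.Str.slice cb none (some (n : Int)) ++ base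
        ++ PySem.Str.slice cb (some ((n : Int) + 1)) none = s)
      ↔ s.toList = cb.toList.set n b := by
  rw [← String.toList_inj, built_toList, hb, List.set_eq_take_cons_drop b hn,
    List.append_assoc]
  exact eq_comm

theorem base_chars (base : String) (hb : base ∈ (["A", "C", "G", "T"] : List String)) :
    ∃ b, b ∈ (['A', 'C', 'G', 'T'] : List Char) ∧ base.toList = [b] := by
  simp only [List.mem_cons, List.not_mem_nil, or_false] at hb
  rcases hb with h | h | h | h
  · exact ⟨'A', by decide, by rw [h]; decide⟩
  · exact ⟨'C', by decide, by rw [h]; decide⟩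
  · exact ⟨'G', by decide, by rw [h]; decide⟩
  · exact ⟨'T', by decide, by rw [h]; decide⟩

theorem char_bases (b : Char) (hb : b ∈ (['A', 'C', 'G', 'T'] : List Char)) :
    ∃ base, base ∈ (["A", "C", "G", "T"] : List String) ∧ base.toList = [b] := by
  simp only [List.mem_cons, List.not_mem_nil, or_false] at hb
  rcases hb with h | h | h | h
  · exact ⟨"A", by decide, by rw [h]; decide⟩
  · exact ⟨"C", by decide, by rw [h]; decide⟩
  · exact ⟨"G", by decide, by rw [h]; decide⟩
  · exact ⟨"T", by decide, by rw [h]; decide⟩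

-- membership in A's mutant list, characterised by List.set
theorem mem_mutants_iff_set (cb : String) (n : Nat) (s : String)
    (hn : n < cb.toList.length) :
    s ∈ pvMutants cb (n : Int)
      ↔ ∃ b, b ∈ (['A', 'C', 'G', 'T'] : List Char)
          ∧ s.toList = cb.toList.set n b ∧ cb.toList[n]? ≠ some b := by
  unfold pvMutants
  rw [List.mem_filter]
  simp only [List.mem_map, decide_eq_true_eq]
  constructor
  · rintro ⟨⟨base, hbase, heq⟩, hne⟩
    rcases base_chars base hbase with ⟨b, hbm, hbl⟩
    have hset := (build_eq_iff cb s base b n hn hbl).mp heq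
    refine ⟨b, hbm, hset, fun hcl => hne ?_⟩
    exact String.toList_inj.mp ((set_eq_self_iff cb.toList n b hn).mpr hcl ▸ hset).symm
  · rintro ⟨b, hbm, hset, hne⟩
    rcases char_bases b hbm with ⟨base, hbase, hbl⟩
    refine ⟨⟨base, hbase, (build_eq_iff cb s base b n hn hbl).mpr hset⟩, fun hcb => ?_⟩
    exact hne ((set_eq_self_iff cb.toList n b hn).mp (by rw [← hset, ← hcb]))

-- B's classification, characterised by List.set
theorem cond_iff_set (cl : List Char) (n : Nat) (hn : n < cl.length) (s : List Char) :
    (s.length = cl.length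
        ∧ (List.range cl.length).filter (fun j => s[j]? ≠ cl[j]?) = [n]
        ∧ (s[n]? = some 'A' ∨ s[n]? = some 'C' ∨ s[n]? = some 'G' ∨ s[n]? = some 'T'))
      ↔ ∃ b, b ∈ (['A', 'C', 'G', 'T'] : List Char)
          ∧ s = cl.set n b ∧ cl[n]? ≠ some b := by
  constructor
  · rintro ⟨hlen, hfil, hacgt⟩
    have hmem : ∀ j, (j ∈ (List.range cl.length).filter (fun j => decide (s[j]? ≠ cl[j]?))) ↔ j = n := by
      intro j; rw [hfil]; exact List.mem_singleton
    have hjn : ∀ j, j < cl.length → j ≠ n → s[j]? = cl[j]? := by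
      intro j hj hjne
      by_contra hne
      exact hjne ((hmem j).mp (List.mem_filter.mpr
        ⟨List.mem_range.mpr hj, decide_eq_true hne⟩))
    have hn_ne : s[n]? ≠ cl[n]? := by
      have := (hmem n).mpr rfl
      exact of_decide_eq_true (List.mem_filter.mp this).2
    obtain ⟨b, hbm, hsb⟩ : ∃ b, b ∈ (['A', 'C', 'G', 'T'] : List Char) ∧ s[n]? = some b := by
      rcases hacgt with h | h | h | h
      · exact ⟨'A', by decide, h⟩
      · exact ⟨'C', by decide, h⟩
      · exact ⟨'G', by decide, h⟩
      · exact ⟨'T', by decide, h⟩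
    refine ⟨b, hbm, ?_, fun hcl => hn_ne (hsb.trans hcl.symm)⟩
    apply List.ext_getElem?
    intro j
    rw [List.getElem?_set]
    by_cases hjn' : n = j
    · subst hjn'
      rw [if_pos rfl, if_pos hn, hsb]
    · rw [if_neg hjn']
      by_cases hj : j < cl.length
      · exact hjn j hj (fun h => hjn' h.symm)
      · rw [List.getElem?_eq_none (by omega), List.getElem?_eq_none (by omega)]
  · rintro ⟨b, hbm, hset, hne⟩
    subst hset
    have hsn : (cl.set n b)[n]? = some b := by
      rw [List.getElem?_set, if_pos rfl, if_pos hn]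
    refine ⟨List.length_set .., ?_, ?_⟩
    · have hcongr : ∀ j ∈ List.range cl.length,
          (decide ((cl.set n b)[j]? ≠ cl[j]?)) = decide (j = n) := by
        intro j hj
        by_cases hjn' : j = n
        · subst hjn'
          have h1 : (cl.set j b)[j]? ≠ cl[j]? := by
            rw [hsn]; exact fun h => hne h.symm
          simp [h1]
        · rw [List.getElem?_set, if_neg (fun h => hjn' h.symm)]
          simp [hjn']
      rw [List.filter_congr hcongr, List.filter_eq, List.count_range, if_pos hn]
      rfl
    · rw [hsn]
      simp only [List.mem_cons, List.not_mem_nil, or_false] at hbm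
      rcases hbm with h | h | h | h
      · subst h; exact Or.inl rfl
      · subst h; exact Or.inr (Or.inl rfl)
      · subst h; exact Or.inr (Or.inr (Or.inl rfl))
      · subst h; exact Or.inr (Or.inr (Or.inr rfl))

theorem mem_mutants_iff (cb : String) (n : Nat) (s : String)
    (hn : n < cb.toList.length) :
    s ∈ pvMutants cb (n : Int)
      ↔ (s.toList.length = cb.toList.length
          ∧ (List.range cb.toList.length).filter (fun j => s.toList[j]? ≠ cb.toList[j]?) = [n]
          ∧ (s.toList[n]? = some 'A' ∨ s.toList[n]? = some 'C' ∨ s.toList[n]? = some 'G' ∨ s.toList[n]? = some 'T')) := by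
  rw [mem_mutants_iff_set cb n s hn, cond_iff_set cb.toList n hn s.toList]

theorem nodup_mutants (cb : String) (n : Nat) (hn : n < cb.toList.length) :
    (pvMutants cb (n : Int)).Nodup := by
  unfold pvMutants
  apply List.Nodup.filter
  apply List.Nodup.map_on ?_ (by decide)
  intro x hx y hy hf
  rcases base_chars x hx with ⟨bx, _, hxl⟩
  rcases base_chars y hy with ⟨by_, _, hyl⟩
  have := congrArg String.toList hf
  rw [built_toList, built_toList, hxl, hyl, List.append_assoc, List.append_assoc] at this
  have hb : bx = by_ := by
    have h2 := List.append_cancel_left this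
    simpa using h2
  rw [← String.toList_inj, hxl, hyl, hb]

-- the per-entry bridge between A's membership test and B's classification
theorem entry_bridge (cb : String) (n : Nat) (hn : n < cb.toList.length)
    (p : String × Int) :
    (if p.1 ∈ pvMutants cb (n : Int) then p.2 else 0) = contrib cb.toList n p := by
  by_cases hmem : p.1 ∈ pvMutants cb (n : Int)
  · obtain ⟨hlen, hfil, hacgt⟩ := (mem_mutants_iff cb n p.1 hn).mp hmem
    rw [if_pos hmem]
    unfold contrib
    rw [if_pos hlen, hfil]
    show p.2 = if (p.1.toList[n]? = some 'A' ∨ p.1.toList[n]? = some 'C'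
        ∨ p.1.toList[n]? = some 'G' ∨ p.1.toList[n]? = some 'T') then
        (if n = n then p.2 else 0) else 0
    rw [if_pos hacgt, if_pos rfl]
  · rw [if_neg hmem]
    unfold contrib
    by_cases hlen : p.1.toList.length = cb.toList.length
    · rw [if_pos hlen]
      rcases hfe : (List.range cb.toList.length).filter
          (fun j => p.1.toList[j]? ≠ cb.toList[j]?) with _ | ⟨i, tl⟩
      · rw [hfe]
      · rcases tl with _ | ⟨i2, tl2⟩
        · rw [hfe]
          show (0 : Int) = if (p.1.toList[i]? = some 'A' ∨ p.1.toList[i]? = some 'C'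
              ∨ p.1.toList[i]? = some 'G' ∨ p.1.toList[i]? = some 'T') then
              (if i = n then p.2 else 0) else 0
          by_cases hacgt : (p.1.toList[i]? = some 'A' ∨ p.1.toList[i]? = some 'C'
              ∨ p.1.toList[i]? = some 'G' ∨ p.1.toList[i]? = some 'T')
          · rw [if_pos hacgt]
            have hin : i ≠ n := fun h =>
              hmem ((mem_mutants_iff cb n p.1 hn).mpr ⟨hlen, h ▸ hfe, h ▸ hacgt⟩)
            rw [if_neg hin]
          · rw [if_neg hacgt]
        · rw [hfe]
    · rw [if_neg hlen]

-- B's accumulator: length invariant and value characterisation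
def altStep (cl : List Char) (counts : List Int) (p : String × Int) : List Int :=
  if p.1.toList.length = cl.length then
    match (List.range cl.length).filter (fun j => p.1.toList[j]? ≠ cl[j]?) with
    | [i] =>
      if p.1.toList[i]? = some 'A' ∨ p.1.toList[i]? = some 'C' ∨ p.1.toList[i]? = some 'G' ∨ p.1.toList[i]? = some 'T' then
        counts.set i (counts.getD i 0 + p.2)
      else counts
    | _ => counts
  else counts

theorem altStep_length (cl : List Char) (counts : List Int) (p : String × Int) :
    (altStep cl counts p).length = counts.length := by
  unfold altStep
  split
  · split
    · split
      · exact List.length_set ..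
      · rfl
    · rfl
  · rfl

theorem mem_of_filter_eq_singleton {p : Nat → Bool} {L i : Nat}
    (h : (List.range L).filter p = [i]) : i < L := by
  have : i ∈ (List.range L).filter p := by rw [h]; exact List.mem_singleton.mpr rfl
  exact List.mem_range.mp (List.mem_of_mem_filter this)

theorem altStep_getD (cl : List Char) (counts : List Int) (p : String × Int)
    (n : Nat) (hn : n < cl.length) (hlen : counts.length = cl.length) :
    (altStep cl counts p).getD n 0 = counts.getD n 0 + contrib cl n p := by
  unfold altStep contrib
  by_cases h : p.1.toList.length = cl.length
  · simp only [if_pos h]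
    split
    case h_1 i heq =>
      have hi : i < counts.length := hlen ▸ mem_of_filter_eq_singleton heq
      split_ifs with hacgt hin
      · subst hin
        rw [List.getD_eq_getElem?_getD, List.getD_eq_getElem?_getD,
          List.getElem?_set, if_pos rfl, if_pos hi]
        simp [List.getD_eq_getElem?_getD]
      · rw [add_zero, List.getD_eq_getElem?_getD, List.getD_eq_getElem?_getD,
          List.getElem?_set, if_neg hin]
        exact (List.getD_eq_getElem?_getD).symm
      · rw [add_zero]
    case h_2 => rw [add_zero]
  · simp only [if_neg h, add_zero]

theorem foldl_altStep_getD (cl : List Char) (l : List (String × Int)) (counts : List Int)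
    (n : Nat) (hn : n < cl.length) (hlen : counts.length = cl.length) :
    (l.foldl (altStep cl) counts).getD n 0
      = counts.getD n 0 + (l.map (contrib cl n)).sum := by
  induction l generalizing counts with
  | nil => simp
  | cons p t ih =>
    rw [List.foldl_cons, List.map_cons, List.sum_cons,
      ih _ ((altStep_length cl counts p).trans hlen),
      altStep_getD cl counts p n hn hlen]
    ring

theorem portB_eq_map (cb : String) (c : List (String × Int)) :
    get_number_of_shadows_py_alt cb c
      = (List.range cb.toList.length).map
          (fun (n : Nat) => ((n : Int), (c.map (contrib cb.toList n)).sum)) := by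
  have hdef : get_number_of_shadows_py_alt cb c
      = (List.range cb.toList.length).map
          (fun (i : Nat) => ((i : Int),
            (c.foldl (altStep cb.toList) (List.replicate cb.toList.length 0)).getD i 0)) := rfl
  rw [hdef]
  apply List.map_congr_left
  intro n hn
  have hn' : n < cb.toList.length := List.mem_range.mp hn
  rw [foldl_altStep_getD cb.toList c _ n hn' (List.length_replicate)]
  have : (List.replicate cb.toList.length (0 : Int)).getD n 0 = 0 := by
    rw [List.getD_eq_getElem?_getD, List.getElem?_replicate, if_pos hn']
    rfl
  rw [this, zero_add]

-- ===== VERDICT (by name: the statement is the Claim_ definition above) =====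
theorem get_number_of_shadows_py_spec : Claim_equal_get_number_of_shadows_py := by
  intro cb c _ hpre
  unfold Spec_get_number_of_shadows_py
  rw [portA_eq_map, portB_eq_map]
  apply List.map_congr_left
  intro n hn
  have hn' : n < cb.toList.length := List.mem_range.mp hn
  refine Prod.ext rfl ?_
  show aVal cb c (n : Int) = (c.map (contrib cb.toList n)).sum
  rw [aVal, foldl_lookup_eq_sum, zero_add,
    sum_lookup_eq_sum_entries c _ hpre (nodup_mutants cb n hn')]
  apply congrArg List.sum
  apply List.map_congr_left
  intro p _
  have := entry_bridge cb n hn' p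
  simpa using this
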